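-- pv_equiv track=rewrite | github.com/fhewett/rst-features | initialise.py | get_nuc_rels
-- ===== SOURCE A (Python) =====
-- def get_nuc_rels(path_dict):
--
--     rel_dict = dict()
--
--     for n in list(path_dict.keys()):
--
--         length, rel = [], []
--         for elem in path_dict[n]:
--             rel.append(elem[0])
--             length.append(len(elem[1]))
--
--         rel_dict[n] = rel[length.index(min(length))]
--
--     return rel_dict
-- ===== SOURCE B (Python) =====
-- def get_nuc_rels(path_dict):
--     return {n: sorted(elems, key=lambda e: len(e[1]))[0][0]
--             for n, elems in path_dict.items()}
-- ===== Notes on version B (the rewrite author's own statement) =====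
-- stated objective: alternative
-- what changed: Replaces the per-key parallel rel/length lists plus rel[length.index(min(length))] selection with a stable sort of each key's elements by path length and taking the first element's relation; stability makes ties go to the first minimal element exactly as A's first-index-of-min does.
import Mathlib
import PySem

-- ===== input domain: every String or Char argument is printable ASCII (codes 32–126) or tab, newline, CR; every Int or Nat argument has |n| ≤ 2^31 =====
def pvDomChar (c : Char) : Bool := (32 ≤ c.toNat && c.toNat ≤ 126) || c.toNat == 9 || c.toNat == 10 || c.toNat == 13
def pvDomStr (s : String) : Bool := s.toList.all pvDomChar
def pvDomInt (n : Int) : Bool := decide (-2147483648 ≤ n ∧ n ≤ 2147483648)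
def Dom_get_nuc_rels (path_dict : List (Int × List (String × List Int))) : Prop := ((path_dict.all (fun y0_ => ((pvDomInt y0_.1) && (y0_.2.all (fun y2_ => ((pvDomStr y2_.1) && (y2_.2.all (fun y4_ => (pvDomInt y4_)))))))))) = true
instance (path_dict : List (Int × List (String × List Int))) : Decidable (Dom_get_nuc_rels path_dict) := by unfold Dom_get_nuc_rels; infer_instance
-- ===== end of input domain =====

-- B replaces A's parallel rel/length lists and rel[length.index(min(length))] with a stable
-- sort of each key's elements by path length and taking the first element; alternative algorithm.


-- ===== PORT A =====
-- rel_dict[n] = rel[length.index(min(length))] after the rel/length building loop;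
-- the "" defaults are unreachable: Python raises ValueError (min of empty) there, excluded by Pre_.
def pvPickA (elems : List (String × List Int)) : String :=
  let lr := elems.foldl
    (fun (s : List Int × List String) elem =>
      (s.1 ++ [(elem.2.length : Int)], s.2 ++ [elem.1])) ([], [])
  match PySem.List.min? lr.1 (fun z => z) with
  | none => ""
  | some m =>
    match PySem.List.index? lr.1 m with
    | none => ""
    | some i => (PySem.List.pyGet? lr.2 (i : Int)).getD ""

-- path_dict[n] is getD n []: exact since every n iterated is a key of the dict
def get_nuc_rels (path_dict : List (Int × List (String × List Int))) : List (Int × String) :=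
  ((PySem.Dict.mk path_dict).keys.foldl
    (fun (rd : PySem.Dict Int String) n =>
      rd.insert n (pvPickA ((PySem.Dict.mk path_dict).getD n [])))
    PySem.Dict.empty).items

-- ===== PORT B =====
-- sorted(elems, key=lambda e: len(e[1]))[0][0]; the "" default is unreachable:
-- Python raises IndexError there ([][0]), excluded by Pre_.
def pvPickB (elems : List (String × List Int)) : String :=
  match PySem.List.pyGet? (PySem.List.sorted elems (fun e => (e.2.length : Int))) (0 : Int) with
  | none => ""
  | some e => e.1

def get_nuc_rels_alt (path_dict : List (Int × List (String × List Int))) : List (Int × String) :=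
  path_dict.map (fun p => (p.1, pvPickB p.2))

-- ===== PRECONDITION & SPEC =====
-- Pre_ excludes inputs where some key maps to a list with no elements (A's min([]) raises ValueError,
-- B's [][0] raises IndexError) and association lists with duplicate keys (not a valid encoding of a Python dict).
def Pre_get_nuc_rels (path_dict : List (Int × List (String × List Int))) : Prop :=
  (path_dict.map Prod.fst).Nodup ∧ ∀ p ∈ path_dict, p.2 ≠ []
instance (path_dict : List (Int × List (String × List Int))) : Decidable (Pre_get_nuc_rels path_dict) := by unfold Pre_get_nuc_rels; infer_instance
def pvWitness_get_nuc_rels : (List (Int × List (String × List Int))) :=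
  [(1, [("elab", [1, 2]), ("span", [3])]), (2, [("joint", [4])])]
def Spec_get_nuc_rels (path_dict : List (Int × List (String × List Int))) (out : List (Int × String)) : Prop := out = get_nuc_rels_alt path_dict
instance (path_dict : List (Int × List (String × List Int))) (out : List (Int × String)) : Decidable (Spec_get_nuc_rels path_dict out) := by unfold Spec_get_nuc_rels; infer_instance

-- ===== CLAIM (what is proved, stated in full; the proofs are below) =====
def Claim_equal_get_nuc_rels : Prop := ∀ (path_dict : List (Int × List (String × List Int))), Dom_get_nuc_rels path_dict → Pre_get_nuc_rels path_dict → Spec_get_nuc_rels path_dict (get_nuc_rels path_dict)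

-- ===== LEMMAS AND PROOFS =====

-- running min?'s foldl from a 'some' start is the plain running-min loop
theorem pv_foldl_some {α : Type} (key : α → Int) :
    ∀ (l : List α) (x : α),
      l.foldl
        (fun acc z =>
          match acc with
          | none => some z
          | some m => if key z < key m then some z else some m)
        (some x)
      = some (l.foldl (fun m z => if key z < key m then z else m) x) := by
  intro l
  induction l with
  | nil => intro x; rfl
  | cons y t ih =>
    intro x
    simp only [List.foldl_cons]
    by_cases h : key y < key x <;> simp [h, ih]

theorem pv_min?_cons {α : Type} (key : α → Int) (x : α) (t : List α) :
    PySem.List.min? (x :: t) key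
      = some (t.foldl (fun m z => if key z < key m then z else m) x) := by
  simp only [PySem.List.min?, List.foldl_cons]
  exact pv_foldl_some key t x

-- the head of a stable insert: the incoming element takes the head only if strictly smaller
theorem pv_head?_insertBy {α : Type} (key : α → Int) (x : α) (ys : List α) :
    (PySem.List.insertBy (fun a b => decide (key a < key b)) x ys).head? =
      match ys.head? with
      | none => some x
      | some m => if key x < key m then some x else some m := by
  cases ys with
  | nil => rfl
  | cons m t =>
    by_cases h : key x < key m <;> simp [PySem.List.insertBy, h]

-- min? of a list with one more element at the end
theorem pv_min?_append {α : Type} (key : α → Int) (xs : List α) (x : α) :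
    PySem.List.min? (xs ++ [x]) key =
      match PySem.List.min? xs key with
      | none => some x
      | some m => if key x < key m then some x else some m := by
  simp only [PySem.List.min?, List.foldl_append, List.foldl_cons, List.foldl_nil]
  rfl

-- the head of the stable sort is the FIRST key-minimal element, i.e. Python's min(xs, key)
theorem pv_head?_sorted {α : Type} (key : α → Int) (xs : List α) :
    (PySem.List.sorted xs key).head? = PySem.List.min? xs key := by
  induction xs using List.reverseRecOn with
  | nil => simp [PySem.List.sorted_eq_foldl_insertBy, PySem.List.min?]
  | append_singleton xs x ih =>
    rw [PySem.List.sorted_eq_foldl_insertBy, List.foldl_append, List.foldl_cons, List.foldl_nil,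
      ← PySem.List.sorted_eq_foldl_insertBy, pv_head?_insertBy, ih, pv_min?_append]

-- A's min-of-keys / first-index selection finds exactly the first key-minimal element
theorem pv_min_sel {α : Type} (key : α → Int) :
    ∀ (t : List α) (x : α),
      PySem.List.min? ((x :: t).map key) (fun z => z)
        = some (key (t.foldl (fun m z => if key z < key m then z else m) x)) ∧
      ∃ i : Nat,
        PySem.List.index? ((x :: t).map key)
          (key (t.foldl (fun m z => if key z < key m then z else m) x)) = some i ∧
        (x :: t)[i]? = some (t.foldl (fun m z => if key z < key m then z else m) x) := by
  intro t
  induction t with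
  | nil =>
    intro x
    refine ⟨by simp [pv_min?_cons], 0, ?_, rfl⟩
    simp [PySem.List.index?]
  | cons y t' ih =>
    intro x
    set x' : α := if key y < key x then y else x with hx'
    have hstep : (y :: t').foldl (fun m z => if key z < key m then z else m) x
        = t'.foldl (fun m z => if key z < key m then z else m) x' := by
      simp only [List.foldl_cons, hx']
    obtain ⟨ihmin, i', hidx', hget'⟩ := ih x'
    simp only [List.map_cons] at ihmin hidx'
    set a : α := t'.foldl (fun m z => if key z < key m then z else m) x' with ha
    have hmin_le : key a ≤ key x' := by
      have := PySem.List.min?_isMin ihmin (key x') (by simp)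
      simpa using this
    have hminfull : PySem.List.min? ((x :: y :: t').map key) (fun z => z) = some (key a) := by
      simp only [List.map_cons]
      rw [pv_min?_cons] at ihmin ⊢
      simp only [List.foldl_cons]
      rw [show (if key y < key x then key y else key x) = key x' from by rw [hx', apply_ite key]]
      exact ihmin
    refine ⟨hminfull, ?_⟩
    rw [hstep]
    by_cases hyx : key y < key x
    · -- x' = y; key a ≤ key y < key x, so x's key is not the min: index shifts by one
      have hx'y : x' = y := by simp [hx', hyx]
      have hne : key x ≠ key a := by
        have : key a < key x := lt_of_le_of_lt (hx'y ▸ hmin_le) hyx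
        omega
      refine ⟨i' + 1, ?_, ?_⟩
      · simp only [List.map_cons]
        rw [PySem.List.index?_cons_of_ne _ hne]
        rw [hx'y] at hidx'
        rw [hidx']; rfl
      · rw [hx'y] at hget'
        simpa using hget'
    · -- x' = x: the shorter list's answer transfers, skipping y (whose key cannot be the min)
      have hx'x : x' = x := by simp [hx', hyx]
      rw [hx'x] at ihmin hidx' hget'
      by_cases hxm : key x = key a
      · -- first minimal is x itself
        have hidx0 : PySem.List.index? ((x :: y :: t').map key) (key a) = some 0 := by
          simp only [List.map_cons, ← hxm]
          exact PySem.List.index?_cons_self _ _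
        have hi0 : i' = 0 := by
          have h2 : PySem.List.index? (key x :: t'.map key) (key a) = some 0 := by
            rw [← hxm]; exact PySem.List.index?_cons_self _ _
          rw [hidx'] at h2
          exact Option.some.inj h2
        have hax : a = x := by
          rw [hi0] at hget'
          simpa using hget'.symm
        exact ⟨0, by rw [hidx0], by simp [hax]⟩
      · -- min is inside t'; y's key is strictly above it too
        have hyne : key y ≠ key a := by
          have h1 : key a ≤ key x := hx'x ▸ hmin_le
          intro h
          have : key x ≤ key y := le_of_not_gt hyx
          omega
        have htail : PySem.List.index? (t'.map key) (key a) = some (i' - 1) ∧ 1 ≤ i' := by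
          have h := hidx'
          rw [PySem.List.index?_cons_of_ne _ hxm] at h
          cases hj : PySem.List.index? (t'.map key) (key a) with
          | none => rw [hj] at h; simp at h
          | some j =>
            rw [hj] at h; simp at h
            exact ⟨congrArg some (by omega), by omega⟩
        obtain ⟨htl, hi1⟩ := htail
        refine ⟨i' + 1, ?_, ?_⟩
        · simp only [List.map_cons]
          rw [PySem.List.index?_cons_of_ne _ hxm, PySem.List.index?_cons_of_ne _ hyne, htl]
          simp
          omega
        · have : (x :: t')[i']? = some a := hget'
          rw [show (i' : Nat) = (i' - 1) + 1 from by omega] at this ⊢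
          simpa using this

-- the per-key selections agree on nonempty element lists
theorem pv_pick_eq (elems : List (String × List Int)) (h : elems ≠ []) :
    pvPickA elems = pvPickB elems := by
  cases elems with
  | nil => exact absurd rfl h
  | cons x t =>
    unfold pvPickA pvPickB
    rw [PySem.List.foldl_prod_mk
      (f := fun (acc : List Int) (e : String × List Int) => acc ++ [(e.2.length : Int)])
      (g := fun (acc : List String) (e : String × List Int) => acc ++ [e.1])]
    simp only [PySem.List.foldl_append_singleton_eq_map, List.nil_append]
    obtain ⟨hmin, i, hidx, hget⟩ := pv_min_sel (fun e : String × List Int => (e.2.length : Int)) t x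
    simp only [hmin, hidx]
    have hpg : PySem.List.pyGet? ((x :: t).map Prod.fst) (i : Int)
        = ((x :: t).map Prod.fst)[i]? := by
      simp [pysem]
    have hB : PySem.List.pyGet?
        (PySem.List.sorted (x :: t) (fun e => (e.2.length : Int))) (0 : Int)
        = (PySem.List.sorted (x :: t) (fun e => (e.2.length : Int))).head? := by
      simp [pysem, List.head?_eq_getElem?]
    rw [hpg, List.getElem?_map, hget, hB, pv_head?_sorted, pv_min?_cons]
    simp

-- ===== VERDICT (by name: the statement is the Claim_ definition above) =====
theorem get_nuc_rels_spec : Claim_equal_get_nuc_rels := by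
  intro path_dict _hdom hpre
  obtain ⟨hnd, hne⟩ := hpre
  unfold Spec_get_nuc_rels get_nuc_rels get_nuc_rels_alt
  have hkeys : (PySem.Dict.mk path_dict).keys = path_dict.map Prod.fst := rfl
  rw [PySem.Dict.items_foldl_insert_fresh
        ((PySem.Dict.mk path_dict).keys) (fun n => n)
        (fun n => pvPickA ((PySem.Dict.mk path_dict).getD n []))
        PySem.Dict.empty
        (fun a _ => PySem.Dict.contains_empty a)
        (by simpa [hkeys] using hnd)]
  simp only [hkeys, List.map_map]
  simp only [show (PySem.Dict.empty : PySem.Dict Int String).items = [] from rfl, List.nil_append]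
  apply List.map_congr_left
  intro p hp
  have hget : (PySem.Dict.mk path_dict).getD p.1 [] = p.2 :=
    PySem.Dict.getD_of_mem_items (PySem.Dict.mk path_dict)
      (by simpa using hp) (by simpa [hkeys] using hnd) []
  simp only [Function.comp_apply, hget]
  rw [pv_pick_eq p.2 (hne p hp)]
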